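-- pv_equiv track=rewrite | github.com/yoavxyoav/Incoming | app/store.py | _merge_categorized
-- ===== SOURCE A (Python) =====
-- def _merge_categorized(
--     a: dict[str, list[str]], b: dict[str, list[str]]
-- ) -> dict[str, list[str]]:
--     merged: dict[str, set[str]] = {}
--     for area, cities in a.items():
--         merged.setdefault(area, set()).update(cities)
--     for area, cities in b.items():
--         merged.setdefault(area, set()).update(cities)
--     return {area: sorted(cities) for area, cities in sorted(merged.items())}
-- ===== SOURCE B (Python) =====
-- def _merge_categorized(
--     a: dict[str, list[str]], b: dict[str, list[str]]
-- ) -> dict[str, list[str]]: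
--     def sorted_unique(xs):
--         out = []
--         for x in sorted(xs):
--             if not out or out[-1] != x:
--                 out.append(x)
--         return out
--
--     ia = sorted(a.items())
--     ib = sorted(b.items())
--     i = j = 0
--     res = {}
--     while i < len(ia) and j < len(ib):
--         ka, va = ia[i]
--         kb, vb = ib[j]
--         if ka < kb:
--             res[ka] = sorted_unique(va)
--             i += 1
--         elif kb < ka:
--             res[kb] = sorted_unique(vb)
--             j += 1
--         else:
--             res[ka] = sorted_unique(va + vb)
--             i += 1
--             j += 1
--     while i < len(ia):
--         ka, va = ia[i]
--         res[ka] = sorted_unique(va)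
--         i += 1
--     while j < len(ib):
--         kb, vb = ib[j]
--         res[kb] = sorted_unique(vb)
--         j += 1
--     return res
-- ===== Notes on version B (the rewrite author's own statement) =====
-- stated objective: alternative
-- what changed: B uses no set container at all: it sorts each dict's items once, merges the two sorted item lists with a two-pointer walk (mergesort-style) to get the keys in order, and deduplicates each value list by sorting it and skipping adjacent equal elements, instead of A's persistent dict-of-sets built by two setdefault/update loops and sorted at the end.
import Mathlib
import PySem

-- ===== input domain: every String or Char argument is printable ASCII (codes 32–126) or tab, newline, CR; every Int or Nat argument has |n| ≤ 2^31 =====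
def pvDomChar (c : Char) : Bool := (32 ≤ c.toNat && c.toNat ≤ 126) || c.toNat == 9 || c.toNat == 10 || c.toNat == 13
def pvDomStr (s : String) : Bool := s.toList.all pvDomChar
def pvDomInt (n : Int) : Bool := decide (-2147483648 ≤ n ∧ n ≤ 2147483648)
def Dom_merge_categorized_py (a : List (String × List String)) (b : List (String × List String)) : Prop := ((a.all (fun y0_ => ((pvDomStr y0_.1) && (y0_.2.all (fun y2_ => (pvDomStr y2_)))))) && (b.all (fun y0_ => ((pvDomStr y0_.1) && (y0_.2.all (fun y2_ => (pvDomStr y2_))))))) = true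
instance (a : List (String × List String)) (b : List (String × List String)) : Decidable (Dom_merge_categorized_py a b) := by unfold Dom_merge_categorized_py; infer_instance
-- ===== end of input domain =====

-- B replaces A's dict-of-sets (two setdefault/update loops, then sort) by a set-free two-pointer
-- merge of the two sorted item lists, deduplicating each value list by skipping adjacent equal
-- elements of its sorted form; return-value equivalence on association lists with unique keys.
-- ===== PORT A =====
-- merged.setdefault(area, set()).update(cities)
def mergeStep (m : PySem.Dict String (PySem.Set String)) (p : String × List String) : PySem.Dict String (PySem.Set String) :=
  m.modify p.1 PySem.Set.empty (fun s => PySem.Set.update s p.2)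

def merge_categorized_py (a : List (String × List String)) (b : List (String × List String)) : List (String × List String) :=
  let merged := b.foldl mergeStep (a.foldl mergeStep PySem.Dict.empty)
  -- sorted(merged.items()): tuple comparison only ever reaches the first components because the
  -- dict's keys are distinct, so sorting by the key is exact here
  (PySem.List.sorted merged.items (fun p => p.1) false).map
    (fun p => (p.1, PySem.List.sorted p.2 (fun x => x) false))

-- ===== PORT B =====
-- 'if not out or out[-1] != x: out.append(x)'
def suStep (out : List String) (x : String) : List String :=
  if out = [] ∨ PySem.List.pyGet? out (-1) ≠ some x then out ++ [x] else out

-- sorted_unique: sort, then keep each element that differs from the previous one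
def sortedUnique (xs : List String) : List String :=
  (PySem.List.sorted xs (fun x => x) false).foldl suStep []

-- the two-pointer while loops over ia/ib as the obvious recursion on the two lists
def mergeAssoc : List (String × List String) → List (String × List String) → List (String × List String)
  | [], ib => ib.map (fun p => (p.1, sortedUnique p.2))
  | ia, [] => ia.map (fun p => (p.1, sortedUnique p.2))
  | (ka, va) :: ta, (kb, vb) :: tb =>
    if ka < kb then (ka, sortedUnique va) :: mergeAssoc ta ((kb, vb) :: tb)
    else if kb < ka then (kb, sortedUnique vb) :: mergeAssoc ((ka, va) :: ta) tb
    else (ka, sortedUnique (va ++ vb)) :: mergeAssoc ta tb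
  termination_by ia ib => ia.length + ib.length
  decreasing_by all_goals (simp; try omega)

def merge_categorized_py_alt (a : List (String × List String)) (b : List (String × List String)) : List (String × List String) :=
  -- sorted(a.items()) / sorted(b.items()): key sort is exact, the keys are distinct (Pre_)
  mergeAssoc (PySem.List.sorted a (fun p => p.1) false) (PySem.List.sorted b (fun p => p.1) false)

-- ===== PRECONDITION & SPEC =====
-- Pre_ excludes association lists with duplicate keys: they do not represent a Python dict
-- (the Python function's arguments are dicts, whose keys are unique by construction).
def Pre_merge_categorized_py (a : List (String × List String)) (b : List (String × List String)) : Prop :=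
  (a.map Prod.fst).Nodup ∧ (b.map Prod.fst).Nodup
instance (a : List (String × List String)) (b : List (String × List String)) : Decidable (Pre_merge_categorized_py a b) := by unfold Pre_merge_categorized_py; infer_instance
def pvWitness_merge_categorized_py : (List (String × List String)) × (List (String × List String)) :=
  ([("north", ["b", "a", "b"]), ("south", ["c"])], [("north", ["a", "d"]), ("east", [])])

def Spec_merge_categorized_py (a : List (String × List String)) (b : List (String × List String)) (out : List (String × List String)) : Prop := out = merge_categorized_py_alt a b
instance (a : List (String × List String)) (b : List (String × List String)) (out : List (String × List String)) : Decidable (Spec_merge_categorized_py a b out) := by unfold Spec_merge_categorized_py; infer_instance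

-- ===== CLAIM (what is proved, stated in full; the proofs are below) =====
def Claim_equal_merge_categorized_py : Prop := ∀ (a : List (String × List String)) (b : List (String × List String)), Dom_merge_categorized_py a b → Pre_merge_categorized_py a b → Spec_merge_categorized_py a b (merge_categorized_py a b)

-- ===== LEMMAS AND PROOFS =====

-- ---- generic order lemmas ----
theorem pairwise_lt_of_le_nodup (l : List String) (h : l.Pairwise (· ≤ ·)) (hnd : l.Nodup) :
    l.Pairwise (· < ·) :=
  (h.and hnd).imp (fun ⟨hle, hne⟩ => lt_of_le_of_ne hle hne)

theorem strlist_eq_of_pairwise_lt (l1 l2 : List String)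
    (h1 : l1.Pairwise (· < ·)) (h2 : l2.Pairwise (· < ·))
    (hm : ∀ x, x ∈ l1 ↔ x ∈ l2) : l1 = l2 := by
  have nd1 : l1.Nodup := h1.imp (fun h => ne_of_lt h)
  have nd2 : l2.Nodup := h2.imp (fun h => ne_of_lt h)
  exact List.Perm.eq_of_pairwise (fun a b _ _ h h' => absurd h' (lt_asymm h)) h1 h2
    ((List.perm_ext_iff_of_nodup nd1 nd2).mpr hm)

theorem pairlist_eq_of_pairwise_lt (L1 L2 : List (String × List String))
    (h1 : (L1.map Prod.fst).Pairwise (· < ·)) (h2 : (L2.map Prod.fst).Pairwise (· < ·))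
    (hm : ∀ p, p ∈ L1 ↔ p ∈ L2) : L1 = L2 := by
  rw [List.pairwise_map] at h1 h2
  have nd1 : L1.Nodup := h1.imp (fun h heq => absurd (heq ▸ h) (lt_irrefl _))
  have nd2 : L2.Nodup := h2.imp (fun h heq => absurd (heq ▸ h) (lt_irrefl _))
  exact List.Perm.eq_of_pairwise (fun p q _ _ h h' => absurd h' (lt_asymm h)) h1 h2
    ((List.perm_ext_iff_of_nodup nd1 nd2).mpr hm)

theorem le_getLast_of_pairwise_lt (l : List String) (h : l.Pairwise (· < ·))
    (a : String) (ha : a ∈ l) (y : String) (hy : l.getLast? = some y) : a ≤ y := by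
  induction l with
  | nil => cases ha
  | cons x t ih =>
      cases t with
      | nil =>
          simp at ha hy; subst ha; subst hy; rfl
      | cons z u =>
          rw [List.getLast?_cons_cons] at hy
          rcases List.mem_cons.mp ha with rfl | ha
          · have hyin : y ∈ z :: u := List.mem_of_getLast? hy
            exact le_of_lt ((List.pairwise_cons.mp h).1 y hyin)
          · exact ih (List.pairwise_cons.mp h).2 ha hy

-- ---- sortedUnique ----
theorem suStep_eq (out : List String) (x : String) :
    suStep out x = if out.getLast? = some x then out else out ++ [x] := by
  cases out with
  | nil => simp [suStep, PySem.List.pyGet?]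
  | cons y t =>
      simp [suStep, PySem.List.pyGet?, PySem.List.pyIdx?, List.getLast?_eq_getElem?]

theorem foldl_su (l acc : List String) (hl : l.Pairwise (· ≤ ·))
    (hacc : acc.Pairwise (· < ·)) (hle : ∀ a ∈ acc, ∀ x ∈ l, a ≤ x) :
    (l.foldl suStep acc).Pairwise (· < ·) ∧
      ∀ y, y ∈ l.foldl suStep acc ↔ y ∈ acc ∨ y ∈ l := by
  induction l generalizing acc with
  | nil => exact ⟨hacc, fun y => by simp⟩
  | cons x t ih =>
      obtain ⟨hxt, ht⟩ := List.pairwise_cons.mp hl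
      rw [List.foldl_cons, suStep_eq]
      by_cases hlast : acc.getLast? = some x
      · rw [if_pos hlast]
        have hxacc : x ∈ acc := List.mem_of_getLast? hlast
        have hstep := ih acc ht hacc (fun a ha z hz =>
          le_trans (le_getLast_of_pairwise_lt acc hacc a ha x hlast) (hxt z hz))
        refine ⟨hstep.1, fun y => ?_⟩
        rw [hstep.2]
        constructor
        · rintro (h | h)
          · exact Or.inl h
          · exact Or.inr (List.mem_cons_of_mem _ h)
        · rintro (h | h)
          · exact Or.inl h
          · rcases List.mem_cons.mp h with rfl | h
            · exact Or.inl hxacc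
            · exact Or.inr h
      · rw [if_neg hlast]
        have hacc' : (acc ++ [x]).Pairwise (· < ·) := by
          rw [List.pairwise_append]
          refine ⟨hacc, List.pairwise_singleton _ _, fun a ha b hb => ?_⟩
          rcases List.mem_singleton.mp hb with rfl
          refine lt_of_le_of_ne (hle a ha b List.mem_cons_self) (fun heq => ?_)
          obtain ⟨y, hy⟩ := Option.isSome_iff_exists.mp
            (List.getLast?_isSome.mpr (List.ne_nil_of_mem ha))
          have hyx : y ≤ b := hle y (List.mem_of_getLast? hy) b List.mem_cons_self
          have hay : a ≤ y := le_getLast_of_pairwise_lt acc hacc a ha y hy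
          exact hlast (hy.trans (congrArg some (le_antisymm hyx (heq ▸ hay))))
        have hle' : ∀ a ∈ acc ++ [x], ∀ z ∈ t, a ≤ z := by
          intro a ha z hz
          rcases List.mem_append.mp ha with ha | ha
          · exact hle a ha z (List.mem_cons_of_mem _ hz)
          · rcases List.mem_singleton.mp ha with rfl
            exact hxt z hz
        have hstep := ih (acc ++ [x]) ht hacc' hle'
        refine ⟨hstep.1, fun y => ?_⟩
        rw [hstep.2]
        simp only [List.mem_append, List.mem_cons]
        tauto

theorem sortedUnique_spec (xs : List String) :
    (sortedUnique xs).Pairwise (· < ·) ∧ ∀ y, y ∈ sortedUnique xs ↔ y ∈ xs := by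
  have h := foldl_su (PySem.List.sorted xs (fun x => x) false) []
    (PySem.List.sorted_pairwise xs (fun x => x)) (List.Pairwise.nil) (by simp)
  refine ⟨h.1, fun y => ?_⟩
  rw [sortedUnique] at *
  rw [h.2, PySem.List.mem_sorted]
  simp

-- ---- lookup in an association list ----
def lookupD (l : List (String × List String)) (k : String) : List String :=
  ((l.find? (fun p => p.1 == k)).map Prod.snd).getD []

theorem lookupD_nil (k : String) : lookupD [] k = [] := rfl

theorem lookupD_cons (p : String × List String) (t : List (String × List String)) (k : String) :
    lookupD (p :: t) k = if p.1 = k then p.2 else lookupD t k := by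
  by_cases h : p.1 = k <;> simp [lookupD, List.find?_cons, h]

theorem lookupD_eq_nil_of_not_mem (l : List (String × List String)) (k : String)
    (h : k ∉ l.map Prod.fst) : lookupD l k = [] := by
  induction l with
  | nil => rfl
  | cons p t ih =>
      simp only [List.map_cons, List.mem_cons, not_or] at h
      rw [lookupD_cons, if_neg (fun he => h.1 he.symm)]
      exact ih h.2

theorem mem_lookupD (l : List (String × List String)) (hnd : (l.map Prod.fst).Nodup)
    (k x : String) : x ∈ lookupD l k ↔ ∃ p ∈ l, p.1 = k ∧ x ∈ p.2 := by
  induction l with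
  | nil => simp [lookupD]
  | cons q t ih =>
      simp only [List.map_cons, List.nodup_cons] at hnd
      rw [lookupD_cons]
      by_cases h : q.1 = k
      · subst h
        rw [if_pos rfl]
        constructor
        · intro hx; exact ⟨q, List.mem_cons_self, rfl, hx⟩
        · rintro ⟨p, hp, h1, hx⟩
          rcases List.mem_cons.mp hp with rfl | hp
          · exact hx
          · exact absurd (h1 ▸ List.mem_map_of_mem hp) hnd.1
      · rw [if_neg h, ih hnd.2]
        constructor
        · rintro ⟨p, hp, h1, hx⟩; exact ⟨p, List.mem_cons_of_mem _ hp, h1, hx⟩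
        · rintro ⟨p, hp, h1, hx⟩
          rcases List.mem_cons.mp hp with rfl | hp
          · exact absurd h1 h
          · exact ⟨p, hp, h1, hx⟩

theorem lookupD_self (l : List (String × List String)) (hnd : (l.map Prod.fst).Nodup)
    (q : String × List String) (hq : q ∈ l) : lookupD l q.1 = q.2 := by
  induction l with
  | nil => cases hq
  | cons p t ih =>
      simp only [List.map_cons, List.nodup_cons] at hnd
      rw [lookupD_cons]
      rcases List.mem_cons.mp hq with rfl | hq
      · rw [if_pos rfl]
      · have hne : ¬ p.1 = q.1 := fun he => hnd.1 (by rw [he]; exact List.mem_map_of_mem hq)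
        rw [if_neg hne, ih hnd.2 hq]

-- ---- characterization of a map (k, f k) over a key list ----
theorem mem_map_key (L : List String) (f : String → List String) (p : String × List String) :
    p ∈ L.map (fun k => (k, f k)) ↔ p.1 ∈ L ∧ p.2 = f p.1 := by
  rw [List.mem_map]
  constructor
  · rintro ⟨k, hk, rfl⟩; exact ⟨hk, rfl⟩
  · rintro ⟨hk, hv⟩; exact ⟨p.1, hk, by rw [← hv]⟩

-- membership characterization of `l.map (fun q => (q.1, sortedUnique q.2))` (strict key order)
theorem mem_map_su (l : List (String × List String)) (hnd : (l.map Prod.fst).Nodup)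
    (p : String × List String) :
    p ∈ l.map (fun q => (q.1, sortedUnique q.2)) ↔
      p.1 ∈ l.map Prod.fst ∧ p.2 = sortedUnique (lookupD l p.1) := by
  rw [List.mem_map]
  constructor
  · rintro ⟨q, hq, rfl⟩
    refine ⟨List.mem_map.mpr ⟨q, hq, rfl⟩, ?_⟩
    show sortedUnique q.2 = sortedUnique (lookupD l q.1)
    rw [lookupD_self l hnd q hq]
  · rintro ⟨hk, hv⟩
    obtain ⟨q, hq, hq1⟩ := List.mem_map.mp hk
    have hlk : lookupD l p.1 = q.2 := by rw [← hq1]; exact lookupD_self l hnd q hq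
    have hv2 : sortedUnique q.2 = p.2 := by rw [hv, hlk]
    exact ⟨q, hq, Prod.ext hq1 hv2⟩

theorem mem_map_fst_cons (k0 : String) (v0 : List String) (t : List (String × List String)) (k : String) :
    k ∈ ((k0, v0) :: t).map Prod.fst ↔ k = k0 ∨ k ∈ t.map Prod.fst := by
  simp

-- ---- the two-pointer merge ----
theorem mergeAssoc_spec (ia ib : List (String × List String))
    (h1 : (ia.map Prod.fst).Pairwise (· < ·)) (h2 : (ib.map Prod.fst).Pairwise (· < ·)) :
    ((mergeAssoc ia ib).map Prod.fst).Pairwise (· < ·) ∧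
      ∀ p : String × List String, p ∈ mergeAssoc ia ib ↔
        ((p.1 ∈ ia.map Prod.fst ∨ p.1 ∈ ib.map Prod.fst) ∧
          p.2 = sortedUnique (lookupD ia p.1 ++ lookupD ib p.1)) := by
  revert h1 h2
  induction ia, ib using mergeAssoc.induct with
  | case1 ib =>
      intro h1 h2
      rw [mergeAssoc]
      have hnd : (ib.map Prod.fst).Nodup := h2.imp (fun h => ne_of_lt h)
      refine ⟨by rw [List.map_map]; exact h2, fun p => ?_⟩
      rw [mem_map_su ib hnd p, lookupD_nil, List.nil_append]
      simp only [List.map_nil, List.not_mem_nil, false_or]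
  | case2 ia hne =>
      intro h1 h2
      obtain ⟨q0, t0, rfl⟩ : ∃ q t, ia = q :: t := by
        cases ia with
        | nil => exact absurd rfl hne
        | cons q t => exact ⟨q, t, rfl⟩
      rw [mergeAssoc]
      case x_2 => simp
      have hnd : ((q0 :: t0).map Prod.fst).Nodup := h1.imp (fun h => ne_of_lt h)
      refine ⟨by rw [List.map_map]; exact h1, fun p => ?_⟩
      rw [mem_map_su _ hnd p, lookupD_nil, List.append_nil]
      simp only [List.map_nil, List.not_mem_nil, or_false]
  | case3 ka va ta kb vb tb hlt ih =>
      intro h1 h2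
      rw [mergeAssoc, if_pos hlt]
      simp only [List.map_cons, List.pairwise_cons] at h1 h2
      have ih' := ih h1.2 (by simp only [List.map_cons, List.pairwise_cons]; exact h2)
      have hkey_gt : ∀ k, (k ∈ ta.map Prod.fst ∨ k ∈ ((kb, vb) :: tb).map Prod.fst) → ka < k := by
        intro k hk
        rcases hk with hk | hk
        · exact h1.1 k hk
        · rcases (mem_map_fst_cons kb vb tb k).mp hk with rfl | hk
          · exact hlt
          · exact lt_trans hlt (h2.1 k hk)
      constructor
      · rw [List.map_cons]
        refine List.pairwise_cons.mpr ⟨?_, ih'.1⟩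
        intro k hk
        obtain ⟨p, hp, rfl⟩ := List.mem_map.mp hk
        exact hkey_gt p.1 ((ih'.2 p).mp hp).1
      · intro p
        rw [List.mem_cons, ih'.2]
        by_cases hpk : p.1 = ka
        · have hnotib : p.1 ∉ ((kb, vb) :: tb).map Prod.fst := by
            intro hmem
            rcases (mem_map_fst_cons kb vb tb p.1).mp hmem with h | h
            · rw [hpk] at h
              exact absurd (h ▸ hlt) (lt_irrefl _)
            · exact absurd (lt_trans hlt (h2.1 _ h)) (by rw [hpk]; exact lt_irrefl _)
          have hnotta : p.1 ∉ ta.map Prod.fst := fun h =>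
            absurd (h1.1 _ h) (by rw [hpk]; exact lt_irrefl _)
          have hrhs : lookupD ((ka, va) :: ta) p.1 ++ lookupD ((kb, vb) :: tb) p.1 = va := by
            rw [lookupD_cons, if_pos hpk.symm, lookupD_eq_nil_of_not_mem _ _ hnotib,
              List.append_nil]
          rw [hrhs]
          constructor
          · rintro (rfl | ⟨hk, _⟩)
            · exact ⟨Or.inl ((mem_map_fst_cons ka va ta _).mpr (Or.inl hpk)), rfl⟩
            · rcases hk with hk | hk
              · exact absurd hk hnotta
              · exact absurd hk hnotib
          · rintro ⟨_, hv⟩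
            exact Or.inl (Prod.ext hpk hv)
        · have hrhs : lookupD ((ka, va) :: ta) p.1 = lookupD ta p.1 := by
            rw [lookupD_cons, if_neg (fun h => hpk h.symm)]
          rw [hrhs]
          constructor
          · rintro (rfl | ⟨hk, hv⟩)
            · exact absurd rfl hpk
            · refine ⟨?_, hv⟩
              rcases hk with hk | hk
              · exact Or.inl ((mem_map_fst_cons ka va ta _).mpr (Or.inr hk))
              · exact Or.inr hk
          · rintro ⟨hk, hv⟩
            refine Or.inr ⟨?_, hv⟩
            rcases hk with hk | hk
            · rcases (mem_map_fst_cons ka va ta _).mp hk with h | h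
              · exact absurd h hpk
              · exact Or.inl h
            · exact Or.inr hk
  | case4 ka va ta kb vb tb hnlt hlt ih =>
      intro h1 h2
      rw [mergeAssoc, if_neg hnlt, if_pos hlt]
      simp only [List.map_cons, List.pairwise_cons] at h1 h2
      have ih' := ih (by simp only [List.map_cons, List.pairwise_cons]; exact h1) h2.2
      have hkey_gt : ∀ k, (k ∈ ((ka, va) :: ta).map Prod.fst ∨ k ∈ tb.map Prod.fst) → kb < k := by
        intro k hk
        rcases hk with hk | hk
        · rcases (mem_map_fst_cons ka va ta k).mp hk with rfl | hk
          · exact hlt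
          · exact lt_trans hlt (h1.1 k hk)
        · exact h2.1 k hk
      constructor
      · rw [List.map_cons]
        refine List.pairwise_cons.mpr ⟨?_, ih'.1⟩
        intro k hk
        obtain ⟨p, hp, rfl⟩ := List.mem_map.mp hk
        exact hkey_gt p.1 ((ih'.2 p).mp hp).1
      · intro p
        rw [List.mem_cons, ih'.2]
        by_cases hpk : p.1 = kb
        · have hnotia : p.1 ∉ ((ka, va) :: ta).map Prod.fst := by
            intro hmem
            rcases (mem_map_fst_cons ka va ta p.1).mp hmem with h | h
            · rw [hpk] at h
              exact absurd (h ▸ hlt) (lt_irrefl _)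
            · exact absurd (lt_trans hlt (h1.1 _ h)) (by rw [hpk]; exact lt_irrefl _)
          have hnottb : p.1 ∉ tb.map Prod.fst := fun h =>
            absurd (h2.1 _ h) (by rw [hpk]; exact lt_irrefl _)
          have hrhs : lookupD ((ka, va) :: ta) p.1 ++ lookupD ((kb, vb) :: tb) p.1 = vb := by
            rw [lookupD_cons (kb, vb), if_pos hpk.symm,
              lookupD_eq_nil_of_not_mem _ _ hnotia, List.nil_append]
          rw [hrhs]
          constructor
          · rintro (rfl | ⟨hk, _⟩)
            · exact ⟨Or.inr ((mem_map_fst_cons kb vb tb _).mpr (Or.inl hpk)), rfl⟩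
            · rcases hk with hk | hk
              · exact absurd hk hnotia
              · exact absurd hk hnottb
          · rintro ⟨_, hv⟩
            exact Or.inl (Prod.ext hpk hv)
        · have hrhs : lookupD ((kb, vb) :: tb) p.1 = lookupD tb p.1 := by
            rw [lookupD_cons, if_neg (fun h => hpk h.symm)]
          rw [hrhs]
          constructor
          · rintro (rfl | ⟨hk, hv⟩)
            · exact absurd rfl hpk
            · refine ⟨?_, hv⟩
              rcases hk with hk | hk
              · exact Or.inl hk
              · exact Or.inr ((mem_map_fst_cons kb vb tb _).mpr (Or.inr hk))
          · rintro ⟨hk, hv⟩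
            refine Or.inr ⟨?_, hv⟩
            rcases hk with hk | hk
            · exact Or.inl hk
            · rcases (mem_map_fst_cons kb vb tb _).mp hk with h | h
              · exact absurd h hpk
              · exact Or.inr h
  | case5 ka va ta kb vb tb hnlt hnlt' ih =>
      intro h1 h2
      rw [mergeAssoc, if_neg hnlt, if_neg hnlt']
      have hkk : ka = kb := le_antisymm (not_lt.mp hnlt') (not_lt.mp hnlt)
      subst hkk
      simp only [List.map_cons, List.pairwise_cons] at h1 h2
      have ih' := ih h1.2 h2.2
      have hkey_gt : ∀ k, (k ∈ ta.map Prod.fst ∨ k ∈ tb.map Prod.fst) → ka < k := by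
        intro k hk
        rcases hk with hk | hk
        · exact h1.1 k hk
        · exact h2.1 k hk
      constructor
      · rw [List.map_cons]
        refine List.pairwise_cons.mpr ⟨?_, ih'.1⟩
        intro k hk
        obtain ⟨p, hp, rfl⟩ := List.mem_map.mp hk
        exact hkey_gt p.1 ((ih'.2 p).mp hp).1
      · intro p
        rw [List.mem_cons, ih'.2]
        by_cases hpk : p.1 = ka
        · have hnotta : p.1 ∉ ta.map Prod.fst := fun h =>
            absurd (h1.1 _ h) (by rw [hpk]; exact lt_irrefl _)
          have hnottb : p.1 ∉ tb.map Prod.fst := fun h =>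
            absurd (h2.1 _ h) (by rw [hpk]; exact lt_irrefl _)
          have hrhs : lookupD ((ka, va) :: ta) p.1 ++ lookupD ((ka, vb) :: tb) p.1 = va ++ vb := by
            rw [lookupD_cons, if_pos hpk.symm, lookupD_cons, if_pos hpk.symm]
          rw [hrhs]
          constructor
          · rintro (rfl | ⟨hk, _⟩)
            · exact ⟨Or.inl ((mem_map_fst_cons ka va ta _).mpr (Or.inl hpk)), rfl⟩
            · rcases hk with hk | hk
              · exact absurd hk hnotta
              · exact absurd hk hnottb
          · rintro ⟨_, hv⟩
            exact Or.inl (Prod.ext hpk hv)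
        · have hra : lookupD ((ka, va) :: ta) p.1 = lookupD ta p.1 := by
            rw [lookupD_cons, if_neg (fun h => hpk h.symm)]
          have hrb : lookupD ((ka, vb) :: tb) p.1 = lookupD tb p.1 := by
            rw [lookupD_cons, if_neg (fun h => hpk h.symm)]
          rw [hra, hrb]
          constructor
          · rintro (rfl | ⟨hk, hv⟩)
            · exact absurd rfl hpk
            · refine ⟨?_, hv⟩
              rcases hk with hk | hk
              · exact Or.inl ((mem_map_fst_cons ka va ta _).mpr (Or.inr hk))
              · exact Or.inr ((mem_map_fst_cons ka vb tb _).mpr (Or.inr hk))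
          · rintro ⟨hk, hv⟩
            refine Or.inr ⟨?_, hv⟩
            rcases hk with hk | hk
            · rcases (mem_map_fst_cons ka va ta _).mp hk with h | h
              · exact absurd h hpk
              · exact Or.inl h
            · rcases (mem_map_fst_cons ka vb tb _).mp hk with h | h
              · exact absurd h hpk
              · exact Or.inr h

-- ---- A-side: the dict-of-sets fold ----
theorem keys_mergeStep_fold (l : List (String × List String)) (m : PySem.Dict String (PySem.Set String)) :
    (l.foldl mergeStep m).keys = PySem.Set.update m.keys (l.map Prod.fst) :=
  PySem.Dict.keys_foldl_modify_key l Prod.fst _ _ m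

theorem mem_getD_mergeStep_fold (l : List (String × List String)) (m : PySem.Dict String (PySem.Set String)) (k : String) (x : String) :
    x ∈ (l.foldl mergeStep m).getD k PySem.Set.empty ↔
      x ∈ m.getD k PySem.Set.empty ∨ ∃ p ∈ l, p.1 = k ∧ x ∈ p.2 := by
  induction l generalizing m with
  | nil => simp
  | cons p t ih =>
      simp only [List.foldl_cons, ih, mergeStep, PySem.Dict.getD_modify, List.mem_cons]
      by_cases h : k = p.1
      · subst h
        simp only [if_true, PySem.Set.mem_update]
        constructor
        · rintro (((hx | hx) | ⟨q, hq, h1, hx⟩))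
          · exact Or.inl hx
          · exact Or.inr ⟨p, Or.inl rfl, rfl, hx⟩
          · exact Or.inr ⟨q, Or.inr hq, h1, hx⟩
        · rintro (hx | ⟨q, (rfl | hq), h1, hx⟩)
          · exact Or.inl (Or.inl hx)
          · exact Or.inl (Or.inr hx)
          · exact Or.inr ⟨q, hq, h1, hx⟩
      · simp only [if_neg h]
        constructor
        · rintro (hx | ⟨q, hq, rfl, hx⟩)
          · exact Or.inl hx
          · exact Or.inr ⟨q, Or.inr hq, rfl, hx⟩
        · rintro (hx | ⟨q, (rfl | hq), h1, hx⟩)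
          · exact Or.inl hx
          · exact absurd h1.symm h
          · exact Or.inr ⟨q, hq, h1, hx⟩

theorem nodup_getD_mergeStep_fold (l : List (String × List String)) (m : PySem.Dict String (PySem.Set String))
    (hm : ∀ k, (m.getD k PySem.Set.empty).Nodup) (k : String) :
    ((l.foldl mergeStep m).getD k PySem.Set.empty).Nodup := by
  induction l generalizing m with
  | nil => exact hm k
  | cons p t ih =>
      refine ih _ (fun j => ?_)
      simp only [mergeStep, PySem.Dict.getD_modify]
      by_cases h : j = p.1
      · simp only [h, if_true]
        exact PySem.Set.nodup_update _ _ (hm p.1)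
      · simpa [h] using hm j

-- ===== VERDICT is below; main proof =====
theorem merge_categorized_py_spec : Claim_equal_merge_categorized_py := by
  intro a b _ hpre
  obtain ⟨ha, hb⟩ := hpre
  unfold Spec_merge_categorized_py merge_categorized_py merge_categorized_py_alt
  dsimp only
  set ia := PySem.List.sorted a (fun p => p.1) false with hia_def
  set ib := PySem.List.sorted b (fun p => p.1) false with hib_def
  have hpia : (ia.map Prod.fst).Perm (a.map Prod.fst) := (PySem.List.sorted_perm _ _ _).map _
  have hpib : (ib.map Prod.fst).Perm (b.map Prod.fst) := (PySem.List.sorted_perm _ _ _).map _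
  have hia : (ia.map Prod.fst).Pairwise (· < ·) :=
    pairwise_lt_of_le_nodup _ (PySem.List.sorted_map_key_pairwise a (fun p => p.1))
      (hpia.nodup_iff.mpr ha)
  have hib : (ib.map Prod.fst).Pairwise (· < ·) :=
    pairwise_lt_of_le_nodup _ (PySem.List.sorted_map_key_pairwise b (fun p => p.1))
      (hpib.nodup_iff.mpr hb)
  have hB := mergeAssoc_spec ia ib hia hib
  set merged := b.foldl mergeStep (a.foldl mergeStep PySem.Dict.empty) with hmerged
  have hkeys : merged.keys = PySem.Set.ofList (a.map Prod.fst ++ b.map Prod.fst) := by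
    rw [hmerged, keys_mergeStep_fold, keys_mergeStep_fold, PySem.Set.ofList_append]
    rfl
  have hnd : merged.keys.Nodup := hkeys ▸ PySem.Set.nodup_ofList _
  have hndv : ∀ k, (merged.getD k PySem.Set.empty).Nodup := by
    intro k
    refine nodup_getD_mergeStep_fold b _ (fun j => nodup_getD_mergeStep_fold a _ (fun i => ?_) j) k
    simp [PySem.Dict.getD_empty, PySem.Set.empty]
  have hitems : PySem.List.sorted merged.items (fun p => p.1) false
      = (PySem.List.sorted merged.keys (fun k => k) false).map (fun k => (k, merged.getD k PySem.Set.empty)) := by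
    refine PySem.List.sorted_eq_of_perm_of_pairwise_lt _ _ _ ?_ ?_
    · rw [PySem.Dict.items_eq_map_keys merged hnd PySem.Set.empty]
      exact (PySem.List.sorted_perm _ _ _).map _
    · have hp := PySem.List.sorted_ofList_pairwise_lt (xs := a.map Prod.fst ++ b.map Prod.fst)
      rw [hkeys]
      exact List.Pairwise.map _ (fun a b h => h) hp
  rw [hitems, List.map_map]
  -- per-key value equality
  have hv : ∀ k, PySem.List.sorted (merged.getD k PySem.Set.empty) (fun x => x) false
      = sortedUnique (lookupD ia k ++ lookupD ib k) := by
    intro k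
    refine strlist_eq_of_pairwise_lt _ _ ?_ ?_ ?_
    · exact pairwise_lt_of_le_nodup _ (PySem.List.sorted_pairwise _ _)
        ((PySem.List.sorted_perm _ _ _).nodup_iff.mpr (hndv k))
    · exact (sortedUnique_spec _).1
    · intro x
      rw [PySem.List.mem_sorted, (sortedUnique_spec _).2, List.mem_append,
        mem_lookupD ia (hia.imp (fun h => ne_of_lt h)) k x,
        mem_lookupD ib (hib.imp (fun h => ne_of_lt h)) k x,
        hmerged, mem_getD_mergeStep_fold, mem_getD_mergeStep_fold]
      simp only [PySem.Dict.getD_empty, PySem.Set.empty, List.not_mem_nil, false_or]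
      constructor
      · rintro (⟨p, hp, h1, hx⟩ | ⟨p, hp, h1, hx⟩)
        · exact Or.inl ⟨p, (PySem.List.sorted_perm _ _ _).mem_iff.mpr hp, h1, hx⟩
        · exact Or.inr ⟨p, (PySem.List.sorted_perm _ _ _).mem_iff.mpr hp, h1, hx⟩
      · rintro (⟨p, hp, h1, hx⟩ | ⟨p, hp, h1, hx⟩)
        · exact Or.inl ⟨p, (PySem.List.sorted_perm _ _ _).mem_iff.mp hp, h1, hx⟩
        · exact Or.inr ⟨p, (PySem.List.sorted_perm _ _ _).mem_iff.mp hp, h1, hx⟩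
  -- whole-list equality via strict key order + membership
  refine pairlist_eq_of_pairwise_lt _ _ ?_ ?_ ?_
  · rw [List.map_map]
    have hp := PySem.List.sorted_ofList_pairwise_lt (xs := a.map Prod.fst ++ b.map Prod.fst)
    rw [hkeys]
    simpa [Function.comp_def] using hp
  · exact hB.1
  · intro p
    rw [hB.2 p]
    have hmm := mem_map_key (PySem.List.sorted merged.keys (fun k => k) false)
      (fun k => PySem.List.sorted (merged.getD k PySem.Set.empty) (fun x => x) false) p
    simp only [Function.comp_def] at hmm ⊢
    rw [hmm, hv p.1]
    have hkmem : p.1 ∈ PySem.List.sorted merged.keys (fun k => k) false ↔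
        (p.1 ∈ ia.map Prod.fst ∨ p.1 ∈ ib.map Prod.fst) := by
      rw [PySem.List.mem_sorted, hkeys, PySem.Set.mem_ofList, List.mem_append,
        hpia.mem_iff, hpib.mem_iff]
    rw [hkmem]
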